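-- pv_equiv track=rewrite | github.com/YosefLab/Cassiopeia | cassiopeia/tools/fitness_estimator/_jungle/jungle/forest.py | unique_list_str
-- ===== SOURCE A (Python) =====
-- def unique_list_str(L):
--     """Ensure each element of a list of strings is unique by appending a number to duplicates.
--     Note that this fails to generate uniqueness if a trio "Name", "Name", "Name_1" exists.
--     """
--     L_unique = []
--     count = {}
--     for s in L:
--         if s in count:
--             s_unique = str(s) + "_" + str(count[s])
--             count[s] += 1
--         else:
--             s_unique = str(s)
--             count[s] = 1
--         L_unique.append(s_unique)
--     return L_unique
-- ===== SOURCE B (Python) =====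
-- def unique_list_str(L):
--     """Ensure each element of a list of strings is unique by appending a number to duplicates.
--     Two-pass reformulation: tally all occurrences first, then walk the list RIGHT-TO-LEFT
--     counting down, so the remaining tally for s is exactly the number of occurrences of s
--     before the current position; the output is built back-to-front and reversed."""
--     remaining = {}
--     for s in L:
--         remaining[s] = remaining.get(s, 0) + 1
--     out = []
--     for s in reversed(L):
--         remaining[s] -= 1
--         c = remaining[s]
--         out.append(str(s) if c == 0 else str(s) + "_" + str(c))
--     out.reverse()
--     return out
-- ===== Notes on version B (the rewrite author's own statement) =====
-- stated objective: alternative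
-- what changed: Replaces the single forward pass with a running counter by two passes: tally total occurrences into a dict, then traverse the list in reverse counting the tally down (remaining count = earlier occurrences) while building the output back-to-front and reversing it at the end.
import Mathlib
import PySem

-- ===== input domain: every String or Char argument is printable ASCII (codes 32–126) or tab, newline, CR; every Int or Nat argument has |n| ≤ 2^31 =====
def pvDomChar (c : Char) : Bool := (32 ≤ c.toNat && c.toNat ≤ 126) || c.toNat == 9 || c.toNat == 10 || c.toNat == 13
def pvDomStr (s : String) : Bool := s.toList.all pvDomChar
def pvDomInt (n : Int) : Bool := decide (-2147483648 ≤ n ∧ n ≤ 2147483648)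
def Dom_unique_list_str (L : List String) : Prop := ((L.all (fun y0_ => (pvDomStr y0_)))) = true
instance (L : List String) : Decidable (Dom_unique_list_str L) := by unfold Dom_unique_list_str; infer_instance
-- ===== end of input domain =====

-- ===== PORT A =====
-- B replaces A's single forward pass with a running counter by two passes (tally totals, then a reverse
-- traversal counting the tally down, output built back-to-front); return values agree on all inputs.
def unique_list_str (L : List String) : List String :=
  (L.foldl
    (fun (st : List String × PySem.Dict String Int) s =>
      if st.2.contains s then
        (st.1 ++ [s ++ "_" ++ PySem.Int.toStr (st.2.getD s 0)],
         st.2.insert s (st.2.getD s 0 + 1))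
      else
        (st.1 ++ [s], st.2.insert s 1))
    ([], PySem.Dict.empty)).1

-- ===== PORT B =====
def unique_list_str_alt (L : List String) : List String :=
  let remaining := L.foldl
    (fun (d : PySem.Dict String Int) s => d.insert s (d.getD s 0 + 1)) PySem.Dict.empty
  let st := L.reverse.foldl
    (fun (st : PySem.Dict String Int × List String) s =>
      let c := st.1.getD s 0 - 1
      (st.1.insert s c,
       st.2 ++ [if c = 0 then s else s ++ "_" ++ PySem.Int.toStr c]))
    (remaining, [])
  st.2.reverse

-- ===== PRECONDITION & SPEC =====
def Spec_unique_list_str (L : List String) (out : List String) : Prop := out = unique_list_str_alt L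
instance (L : List String) (out : List String) : Decidable (Spec_unique_list_str L out) := by unfold Spec_unique_list_str; infer_instance

-- ===== CLAIM (what is proved, stated in full; the proofs are below) =====
def Claim_equal_unique_list_str : Prop := ∀ (L : List String), Dom_unique_list_str L → Spec_unique_list_str L (unique_list_str L)

-- ===== LEMMAS AND PROOFS =====

-- the common reference value: element for string s after prefix P
def pvG (P : List String) (s : String) : String :=
  if P.count s = 0 then s else s ++ "_" ++ PySem.Int.toStr ((P.count s : Nat) : Int)

def pvBuild (P : List String) : List String → List String
  | [] => []
  | s :: R => pvG P s :: pvBuild (P ++ [s]) R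

lemma B_fold_eq_build (R : List String) :
    ∀ (P : List String) (d : PySem.Dict String Int) (out : List String),
    (∀ t, d.getD t 0 = ((P ++ R).count t : Int)) →
    (∀ t, (R.reverse.foldl
      (fun (st : PySem.Dict String Int × List String) s =>
        let c := st.1.getD s 0 - 1
        (st.1.insert s c,
         st.2 ++ [if c = 0 then s else s ++ "_" ++ PySem.Int.toStr c]))
      (d, out)).1.getD t 0 = (P.count t : Int)) ∧
    (R.reverse.foldl
      (fun (st : PySem.Dict String Int × List String) s =>
        let c := st.1.getD s 0 - 1
        (st.1.insert s c,
         st.2 ++ [if c = 0 then s else s ++ "_" ++ PySem.Int.toStr c]))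
      (d, out)).2 = out ++ (pvBuild P R).reverse := by
  induction R with
  | nil => intro P d out hd; exact ⟨by simpa using hd, by simp [pvBuild]⟩
  | cons s R ih =>
    intro P d out hd
    rw [List.reverse_cons, List.foldl_append]
    obtain ⟨ihd, iho⟩ := ih (P ++ [s]) d out (by
      intro t
      rw [hd t]
      congr 1
      simp)
    rw [List.foldl_cons, List.foldl_nil]
    have hc : (R.reverse.foldl
        (fun (st : PySem.Dict String Int × List String) s =>
          let c := st.1.getD s 0 - 1
          (st.1.insert s c,
           st.2 ++ [if c = 0 then s else s ++ "_" ++ PySem.Int.toStr c]))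
        (d, out)).1.getD s 0 - 1 = ((P.count s : Nat) : Int) := by
      rw [ihd s]
      simp [List.count_append]
    refine ⟨?_, ?_⟩
    · intro t
      simp only [hc, PySem.Dict.getD_insert]
      by_cases ht : t = s
      · subst ht; simp
      · rw [if_neg ht, ihd t]
        simp [List.count_append, Ne.symm ht]
    · simp only [hc, iho, pvBuild, pvG, List.reverse_cons, Int.natCast_eq_zero]
      by_cases h0 : P.count s = 0 <;> simp [h0]

lemma A_fold_eq_build (R : List String) :
    ∀ (P acc : List String) (d : PySem.Dict String Int),
    (∀ s, d.getD s 0 = (P.count s : Int)) →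
    (∀ s, d.contains s = decide (s ∈ P)) →
    (R.foldl
      (fun (st : List String × PySem.Dict String Int) s =>
        if st.2.contains s then
          (st.1 ++ [s ++ "_" ++ PySem.Int.toStr (st.2.getD s 0)],
           st.2.insert s (st.2.getD s 0 + 1))
        else
          (st.1 ++ [s], st.2.insert s 1))
      (acc, d)).1 = acc ++ pvBuild P R := by
  induction R with
  | nil => intro P acc d _ _; simp [pvBuild]
  | cons s R ih =>
    intro P acc d hget hcon
    rw [List.foldl_cons]
    by_cases hmem : s ∈ P
    · simp only [hcon s, hget s, hmem, decide_true, if_true]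
      rw [ih (P ++ [s])]
      · have hcnt : P.count s ≠ 0 := by
          have h := List.count_pos_iff.mpr hmem
          omega
        simp [pvBuild, pvG, hcnt]
      · intro t
        rw [PySem.Dict.getD_insert]
        by_cases ht : t = s
        · subst ht; simp [List.count_append]
        · simp [ht, hget t, List.count_append, Ne.symm ht]
      · intro t
        rw [PySem.Dict.contains_insert]
        by_cases ht : t = s
        · subst ht; simp
        · simp [ht, hcon t]
    · have hcnt0 : P.count s = 0 := by
        simpa using List.count_eq_zero.mpr hmem
      simp only [hcon s, hmem, decide_false, if_false, Bool.false_eq_true]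
      rw [ih (P ++ [s])]
      · simp [pvBuild, pvG, hcnt0]
      · intro t
        rw [PySem.Dict.getD_insert]
        by_cases ht : t = s
        · subst ht; simp [List.count_append, hcnt0]
        · simp [ht, hget t, List.count_append, Ne.symm ht]
      · intro t
        rw [PySem.Dict.contains_insert]
        by_cases ht : t = s
        · subst ht; simp
        · simp [ht, hcon t]

-- ===== VERDICT (by name: the statement is the Claim_ definition above) =====
theorem unique_list_str_spec : Claim_equal_unique_list_str := by
  intro L _
  unfold Spec_unique_list_str unique_list_str unique_list_str_alt
  rw [A_fold_eq_build L [] [] PySem.Dict.empty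
        (by intro s; simp [PySem.Dict.getD_empty])
        (by intro s; simp [PySem.Dict.contains_empty])]
  have hcnt : ∀ t, (L.foldl
      (fun (d : PySem.Dict String Int) s => d.insert s (d.getD s 0 + 1))
      PySem.Dict.empty).getD t 0 = (([] ++ L : List String).count t : Int) := by
    intro t
    rw [PySem.Dict.getD_foldl_insert_add_one]
    simp
  obtain ⟨_, ho⟩ := B_fold_eq_build L []
      (L.foldl (fun (d : PySem.Dict String Int) s => d.insert s (d.getD s 0 + 1))
        PySem.Dict.empty) [] hcnt
  simp only [ho]
  simp
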